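-- pv_equiv track=rewrite | github.com/4erpakOFF/mai_8_fac | 1st_year/course_projects/discrete_math/kp8_simple_input.py | to_labels
-- ===== SOURCE A (Python) =====
-- def to_labels( Nodelist ):
--     A=[]
--     for i in range( len(Nodelist) ):
--         tmp = Nodelist[i]
--         done=''
--         if tmp!='':
--             degree=0
--             x=0
--             check=tmp[0]
--             done=''
--             while x < len(tmp):
--                 if tmp[x]==check:
--                     degree+=1
--                     if x!=len(tmp)-1:
--                         x+=1
--                         continue
--
--                 if degree>1:
--                     done=done+check+'^'+str(degree)
--                 else:
--                     done+=check
--                 if x==len(tmp)-1 and tmp[x]!=tmp[x-1]: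
--                     done+=tmp[x]
--                 degree=1
--                 check=tmp[x]
--                 x+=1
--
--         else:
--             pass
--         if done=='':
--             done='E'
--         A+=[ (tmp,'$'+done+'$') ]
--     Labels=dict(A)
--     return Labels
-- ===== SOURCE B (Python) =====
-- def _runs(s):
--     runs = []
--     i = 0
--     n = len(s)
--     while i < n:
--         c = s[i]
--         j = i + 1
--         while j < n and s[j] == c:
--             j += 1
--         runs.append((c, j - i))
--         i = j
--     return runs
--
--
-- def _label(s):
--     done = ''.join(c if k == 1 else c + '^' + str(k) for c, k in _runs(s))
--     if done == '':
--         done = 'E'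
--     return '$' + done + '$'
--
--
-- def to_labels(Nodelist):
--     Labels = {}
--     for tmp in Nodelist:
--         Labels[tmp] = _label(tmp)
--     return Labels
-- ===== Notes on version B (the rewrite author's own statement) =====
-- stated objective: simpler
-- what changed: A's single-pass state machine (degree/check/x with a special-cased last-character fixup) is replaced by a plain run decomposition: an inner scan finds each run boundary, runs are formatted by a comprehension and joined; the dict is built directly instead of via a pair list.
import Mathlib
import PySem

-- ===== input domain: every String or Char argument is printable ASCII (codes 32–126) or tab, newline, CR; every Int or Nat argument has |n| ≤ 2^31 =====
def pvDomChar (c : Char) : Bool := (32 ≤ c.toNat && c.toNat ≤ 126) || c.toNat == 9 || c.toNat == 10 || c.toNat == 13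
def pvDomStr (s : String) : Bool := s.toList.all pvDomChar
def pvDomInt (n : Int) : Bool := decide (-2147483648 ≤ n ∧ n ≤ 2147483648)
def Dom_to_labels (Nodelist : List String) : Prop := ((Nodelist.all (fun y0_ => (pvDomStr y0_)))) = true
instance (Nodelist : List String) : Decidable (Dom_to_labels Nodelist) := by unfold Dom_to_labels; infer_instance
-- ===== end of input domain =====

-- B replaces A's one-pass state machine by an explicit run decomposition (scan to each run
-- boundary, format each run, join) and builds the dict directly: simpler, same cost.
-- The while loops are ported with a fuel counter (initial fuel = string length bounds the
-- iteration count, since the index strictly increases each iteration).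

-- ===== PORT A =====
-- A's while loop; x walks the string once, `continue` = the first recursive call.
def pyA_loop (tmp : List Char) (fuel : Nat) (x : Nat) (degree : Nat) (check : Char)
    (done : List Char) : List Char :=
  match fuel with
  | 0 => done  -- unreachable: fuel ≥ tmp.length - x at every call
  | fuel + 1 =>
    if hx : x < tmp.length then
      let c := tmp[x]
      let degree' := if c = check then degree + 1 else degree
      if c = check ∧ x ≠ tmp.length - 1 then
        pyA_loop tmp fuel (x + 1) degree' check done
      else
        let done₁ := if degree' > 1 then done ++ check :: '^' :: PySem.Int.toChars (degree' : Int)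
                     else done ++ [check]
        -- tmp[x-1] with possibly x = 0: Python's negative-index read, exact via pyGet?
        let done₂ := if x = tmp.length - 1 ∧
            ¬ PySem.List.pyGet? tmp (x : Int) = PySem.List.pyGet? tmp ((x : Int) - 1) then
              done₁ ++ [c]
            else done₁
        pyA_loop tmp fuel (x + 1) 1 c done₂
    else done

def pyA_label (t : List Char) : List Char :=
  let done : List Char :=
    match t with
    | [] => []
    | c :: _ => pyA_loop t t.length 0 0 c []
  let done := if done = [] then ['E'] else done
  '$' :: done ++ ['$']

def to_labels (Nodelist : List String) : List (String × String) :=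
  let A := (PySem.List.pyRange 0 (PySem.List.len Nodelist)).foldl (fun acc i =>
    let tmp := PySem.List.pyGetD Nodelist i ""
    acc ++ [(tmp, String.mk (pyA_label tmp.toList))]) []
  (PySem.Dict.ofList A).items

-- ===== PORT B =====
-- inner while: advance j over the characters equal to c
def pyB_scan (s : List Char) (c : Char) (fuel : Nat) (j : Nat) : Nat :=
  match fuel with
  | 0 => j  -- unreachable: fuel ≥ s.length - j at every call
  | fuel + 1 =>
    if h : j < s.length then
      if s[j] = c then pyB_scan s c fuel (j + 1) else j
    else j

-- outer while of _runs
def pyB_runs (s : List Char) (fuel : Nat) (i : Nat) : List (Char × Nat) :=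
  match fuel with
  | 0 => []  -- unreachable: fuel ≥ s.length - i at every call
  | fuel + 1 =>
    if h : i < s.length then
      let c := s[i]
      let j := pyB_scan s c s.length (i + 1)
      (c, j - i) :: pyB_runs s fuel j
    else []

def pyB_part (p : Char × Nat) : List Char :=
  if p.2 = 1 then [p.1] else p.1 :: '^' :: PySem.Int.toChars (p.2 : Int)

def pyB_label (t : List Char) : List Char :=
  let done := ((pyB_runs t t.length 0).map pyB_part).flatten
  let done := if done = [] then ['E'] else done
  '$' :: done ++ ['$']

def to_labels_alt (Nodelist : List String) : List (String × String) :=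
  (Nodelist.foldl (fun d tmp => d.insert tmp (String.mk (pyB_label tmp.toList)))
    PySem.Dict.empty).items

-- ===== PRECONDITION & SPEC =====
def Spec_to_labels (Nodelist : List String) (out : List (String × String)) : Prop := out = to_labels_alt Nodelist
instance (Nodelist : List String) (out : List (String × String)) : Decidable (Spec_to_labels Nodelist out) := by unfold Spec_to_labels; infer_instance

-- ===== CLAIM (what is proved, stated in full; the proofs are below) =====
def Claim_equal_to_labels : Prop := ∀ (Nodelist : List String), Dom_to_labels Nodelist → Spec_to_labels Nodelist (to_labels Nodelist)

-- ===== LEMMAS AND PROOFS =====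

-- the run decomposition, front first
def runsOf : List Char → List (Char × Nat)
  | [] => []
  | c :: t =>
    (c, 1 + (t.takeWhile (· = c)).length) :: runsOf (t.dropWhile (· = c))
termination_by t => t.length
decreasing_by
  have := List.length_dropWhile_le (· = c) t
  simp; omega

def encode (rs : List (Char × Nat)) : List Char := (rs.map pyB_part).flatten

-- a pending run (c, k) pushed onto the runs of u
def consRun (c : Char) (k : Nat) (rs : List (Char × Nat)) : List (Char × Nat) :=
  match rs with
  | (c', d) :: t => if c' = c then (c, k + d) :: t else (c, k) :: (c', d) :: t
  | [] => [(c, k)]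

theorem consRun_runsOf (c : Char) (k : Nat) (u : List Char) :
    consRun c k (runsOf u) =
      (c, k + (u.takeWhile (· = c)).length) :: runsOf (u.dropWhile (· = c)) := by
  match u with
  | [] => simp [runsOf, consRun]
  | a :: u' =>
    by_cases h : a = c
    · subst h
      simp [runsOf, consRun, List.takeWhile, List.dropWhile]
      omega
    · simp [runsOf, consRun, List.takeWhile, List.dropWhile, h]

-- general list fact used to align the inner scan with dropWhile (no library lemma found)
theorem drop_length_takeWhile {α : Type} (l : List α) (p : α → Bool) :
    l.drop (l.takeWhile p).length = l.dropWhile p := by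
  induction l with
  | nil => simp
  | cons a t ih =>
    by_cases h : p a
    · simp [List.takeWhile, List.dropWhile, h, ih]
    · simp [List.takeWhile, List.dropWhile, h]

theorem le_pyB_scan (s : List Char) (c : Char) : ∀ fuel j, j ≤ pyB_scan s c fuel j := by
  intro fuel
  induction fuel with
  | zero => intro j; simp [pyB_scan]
  | succ fuel ih =>
    intro j
    simp only [pyB_scan]
    split
    · split
      · exact le_trans (by omega) (ih (j + 1))
      · exact le_rfl
    · exact le_rfl

theorem pyB_scan_eq (s : List Char) (c : Char) : ∀ fuel j, s.length - j ≤ fuel →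
    pyB_scan s c fuel j = j + ((s.drop j).takeWhile (· = c)).length := by
  intro fuel
  induction fuel with
  | zero =>
    intro j hj
    rw [List.drop_eq_nil_of_le (by omega)]
    simp [pyB_scan]
  | succ fuel ih =>
    intro j hj
    simp only [pyB_scan]
    split
    · rename_i h
      rw [List.drop_eq_getElem_cons h]
      by_cases hc : s[j] = c
      · simp [hc, List.takeWhile]
        rw [ih (j + 1) (by omega)]
        omega
      · simp [hc, List.takeWhile]
    · rename_i h
      rw [List.drop_eq_nil_of_le (by omega)]
      simp

theorem pyB_runs_eq (s : List Char) : ∀ fuel i, s.length - i ≤ fuel →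
    pyB_runs s fuel i = runsOf (s.drop i) := by
  intro fuel
  induction fuel with
  | zero =>
    intro i hi
    rw [List.drop_eq_nil_of_le (by omega)]
    simp [pyB_runs, runsOf]
  | succ fuel ih =>
    intro i hi
    simp only [pyB_runs]
    split
    · rename_i h
      rw [List.drop_eq_getElem_cons h]
      rw [runsOf]
      have hscan := pyB_scan_eq s s[i] s.length (i + 1) (by omega)
      have hle := le_pyB_scan s s[i] s.length (i + 1)
      show (s[i], pyB_scan s s[i] s.length (i + 1) - i) ::
          pyB_runs s fuel (pyB_scan s s[i] s.length (i + 1)) = _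
      rw [ih (pyB_scan s s[i] s.length (i + 1)) (by omega)]
      rw [hscan]
      congr 2
      · omega
      · rw [← List.drop_drop, drop_length_takeWhile]
    · rename_i h
      rw [List.drop_eq_nil_of_le (by omega)]
      simp [runsOf]

theorem encode_cons (c : Char) (k : Nat) (rs : List (Char × Nat)) :
    encode ((c, k) :: rs) = pyB_part (c, k) ++ encode rs := by
  simp [encode]

-- once the index is past the end, A's loop returns its accumulator at any fuel
theorem pyA_loop_stop (t : List Char) (fuel x degree : Nat) (check : Char) (done : List Char)
    (h : ¬ x < t.length) : pyA_loop t fuel x degree check done = done := by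
  cases fuel <;> simp [pyA_loop, h]

-- A's loop invariant: from x ≥ 1 with a pending run (check, degree) ending at x - 1,
-- the loop appends the encoding of that run merged with the runs of the rest
theorem pyA_loop_inv (t : List Char) : ∀ fuel x degree check done,
    t.length - x ≤ fuel → 1 ≤ x → x < t.length → 1 ≤ degree → t[x - 1]? = some check →
    pyA_loop t fuel x degree check done
      = done ++ encode (consRun check degree (runsOf (t.drop x))) := by
  intro fuel
  induction fuel with
  | zero => intro x degree check done hf hx1 hxlt; omega
  | succ fuel ih =>
    intro x degree check done hf hx1 hxlt hd hc
    have hxc : t[x]? = some t[x] := List.getElem?_eq_getElem hxlt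
    have egetx : PySem.List.pyGet? t (x : Int) = some t[x] := by
      rw [PySem.List.pyGet?_natCast, hxc]
    have egetp : PySem.List.pyGet? t ((x : Int) - 1) = some check := by
      have e2 : ((x : Int) - 1) = ((x - 1 : Nat) : Int) := by omega
      rw [e2, PySem.List.pyGet?_natCast, hc]
    simp only [pyA_loop, dif_pos hxlt]
    by_cases hcs : t[x] = check
    · by_cases hlast : x = t.length - 1
      · -- matched at the last character: emit (check, degree + 1); extra append skipped
        rw [if_neg (by tauto), if_pos hcs]
        rw [if_pos (by omega : degree + 1 > 1)]
        rw [if_neg (by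
          rw [egetx, egetp, hcs]
          simp)]
        rw [pyA_loop_stop t fuel (x + 1) 1 t[x] _ (by omega)]
        have hdrop : t.drop x = [t[x]] := by
          rw [List.drop_eq_getElem_cons hxlt, List.drop_eq_nil_of_le (by omega)]
        rw [hdrop, hcs]
        rw [show runsOf [check] = [(check, 1)] from by simp [runsOf]]
        rw [show consRun check degree [(check, 1)] = [(check, degree + 1)] from by
          simp [consRun]]
        simp [encode, pyB_part]
        omega
      · -- matched, not last: continue with degree + 1
        rw [if_pos ⟨hcs, hlast⟩, if_pos hcs]
        rw [ih (x + 1) (degree + 1) check done (by omega) (by omega) (by omega) (by omega)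
          (by simpa using hxc.trans (by rw [hcs]))]
        congr 1
        rw [consRun_runsOf]
        rw [List.drop_eq_getElem_cons hxlt, hcs]
        rw [runsOf]
        rw [Nat.add_assoc]
        simp [consRun]
    · -- mismatch: emit (check, degree), start a new run at t[x]
      rw [if_neg (by tauto), if_neg hcs]
      have hdone1 : (if degree > 1 then done ++ check :: '^' :: PySem.Int.toChars (degree : Int)
          else done ++ [check]) = done ++ pyB_part (check, degree) := by
        by_cases h1 : degree = 1
        · simp [h1, pyB_part]
        · simp [pyB_part, h1, (by omega : degree > 1)]
      rw [hdone1]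
      by_cases hlast : x = t.length - 1
      · -- last character differs from the pending run: Python's extra `done += tmp[x]`
        rw [if_pos ⟨hlast, by
          rw [egetx, egetp]
          simp only [Option.some.injEq]
          exact fun h => hcs h⟩]
        rw [pyA_loop_stop t fuel (x + 1) 1 t[x] _ (by omega)]
        have hdrop : t.drop x = [t[x]] := by
          rw [List.drop_eq_getElem_cons hxlt, List.drop_eq_nil_of_le (by omega)]
        rw [hdrop]
        rw [show runsOf [t[x]] = [(t[x], 1)] from by simp [runsOf]]
        rw [show consRun check degree [(t[x], 1)] = [(check, degree), (t[x], 1)] from by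
          simp [consRun, hcs]]
        simp [encode, pyB_part]
      · -- run ends in the middle: emit and continue from t[x] with degree 1
        rw [if_neg (by tauto)]
        rw [ih (x + 1) 1 t[x] _ (by omega) (by omega) (by omega) le_rfl (by simp [hxc])]
        rw [consRun_runsOf]
        have hrw : (t[x], 1 + ((t.drop (x + 1)).takeWhile (· = t[x])).length) ::
            runsOf ((t.drop (x + 1)).dropWhile (· = t[x])) = runsOf (t.drop x) := by
          rw [List.drop_eq_getElem_cons hxlt, runsOf]
        rw [hrw]
        have hcons : consRun check degree (runsOf (t.drop x))
            = (check, degree) :: runsOf (t.drop x) := by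
          rw [List.drop_eq_getElem_cons hxlt, runsOf]
          simp [consRun, hcs]
        rw [hcons, encode_cons, List.append_assoc]

-- the per-string labels agree
theorem label_eq (t : List Char) : pyA_label t = pyB_label t := by
  match t with
  | [] => rfl
  | c :: rest =>
    have hB : pyB_runs (c :: rest) (c :: rest).length 0 = runsOf (c :: rest) := by
      rw [pyB_runs_eq (c :: rest) (c :: rest).length 0 (by omega)]
      rfl
    have hA : pyA_loop (c :: rest) (c :: rest).length 0 0 c [] = encode (runsOf (c :: rest)) := by
      simp only [List.length_cons, pyA_loop]
      rw [dif_pos (show 0 < rest.length + 1 from Nat.succ_pos _)]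
      simp only [List.getElem_cons_zero]
      by_cases hr : rest = []
      · subst hr
        simp [pyA_loop, encode, runsOf, pyB_part, PySem.List.pyGet?, PySem.List.pyIdx?]
      · have hpos : 0 < rest.length := by
          cases rest with
          | nil => exact absurd rfl hr
          | cons a l => simp
        rw [if_pos (show True ∧ (0 : Nat) ≠ rest.length + 1 - 1 from ⟨trivial, by omega⟩)]
        show pyA_loop (c :: rest) rest.length 1 1 c [] = _
        rw [pyA_loop_inv (c :: rest) rest.length 1 1 c [] (by simp) le_rfl
          (by simp [hpos]) le_rfl (by simp)]
        rw [consRun_runsOf]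
        simp only [List.drop_succ_cons, List.drop_zero, List.nil_append]
        conv_rhs => rw [runsOf]
    simp only [pyA_label, pyB_label, hA, hB, encode]

-- ===== VERDICT (by name: the statement is the Claim_ definition above) =====
theorem to_labels_spec : Claim_equal_to_labels := by
  intro Nodelist _
  unfold Spec_to_labels to_labels to_labels_alt
  rw [PySem.List.foldl_append_singleton_eq_map]
  simp only [List.nil_append]
  have h := PySem.List.map_pyGetD_pyRange_zero Nodelist ""
  have h1 : (PySem.List.pyRange 0 (PySem.List.len Nodelist)).map
      (fun i => (PySem.List.pyGetD Nodelist i "",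
        String.mk (pyA_label (PySem.List.pyGetD Nodelist i "").toList)))
      = Nodelist.map (fun tmp => (tmp, String.mk (pyA_label tmp.toList))) := by
    conv_rhs => rw [← h]
    rw [List.map_map]
    rfl
  rw [h1]
  have h2 : Nodelist.map (fun tmp => (tmp, String.mk (pyA_label tmp.toList)))
      = Nodelist.map (fun tmp => (tmp, String.mk (pyB_label tmp.toList))) := by
    apply List.map_congr_left
    intro a _
    rw [label_eq]
  rw [h2]
  congr 1
  rw [PySem.Dict.ofList, PySem.Dict.update, List.foldl_map]
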